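-- pv_equiv track=rewrite | github.com/Nennviale/Jeu_snake | jeu_snake.py | pomme_sur_personnage
-- ===== SOURCE A (Python) =====
-- def pomme_sur_personnage(plateau, x, y):
--     i = 0
--     for ligne in plateau:
--         j = 0
--         for case in ligne:
--             if case == True and x==i and y ==j:
--                 print (' La pomme est sur le personnage')
--
--                 return True
--             else:
--                 j = j + 1
--         i = i + 1
--
--     return False
-- ===== SOURCE B (Python) =====
-- def pomme_sur_personnage(plateau, x, y):
--     if 0 <= x < len(plateau) and 0 <= y < len(plateau[x]) and plateau[x][y] == True:
--         print(' La pomme est sur le personnage')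
--         return True
--     return False
-- ===== Notes on version B (the rewrite author's own statement) =====
-- stated objective: faster
-- what changed: Replaced the nested scan over all rows and cells with a single bounds-guarded direct index plateau[x][y].
import Mathlib
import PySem

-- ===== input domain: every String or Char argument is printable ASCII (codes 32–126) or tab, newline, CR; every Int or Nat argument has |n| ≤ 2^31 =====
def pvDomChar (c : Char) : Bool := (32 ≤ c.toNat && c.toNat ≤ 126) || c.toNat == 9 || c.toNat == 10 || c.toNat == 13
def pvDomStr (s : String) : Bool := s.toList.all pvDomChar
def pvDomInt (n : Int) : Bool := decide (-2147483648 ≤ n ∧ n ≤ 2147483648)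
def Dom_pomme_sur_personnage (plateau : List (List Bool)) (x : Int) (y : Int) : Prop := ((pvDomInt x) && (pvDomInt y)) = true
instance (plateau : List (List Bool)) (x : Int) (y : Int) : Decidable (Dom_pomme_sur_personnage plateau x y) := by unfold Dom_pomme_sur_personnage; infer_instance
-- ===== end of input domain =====

-- B replaces A's nested scan over every cell with one bounds-guarded direct index plateau[x][y] (O(1)).
-- Equivalence is about the RETURN value only (A also prints a message when it returns True; B prints the same).

-- ===== PORT A =====
-- inner loop of A: walk the row with counter j; hit when case is True and x==i and y==j
def pommeInnerA (ligne : List Bool) (x y i j : Int) : Bool :=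
  match ligne with
  | [] => false
  | c :: rest => if c == true && x == i && y == j then true else pommeInnerA rest x y i (j + 1)

-- outer loop of A: walk the rows with counter i
def pommeOuterA (plateau : List (List Bool)) (x y i : Int) : Bool :=
  match plateau with
  | [] => false
  | l :: rest => if pommeInnerA l x y i 0 then true else pommeOuterA rest x y (i + 1)

def pomme_sur_personnage (plateau : List (List Bool)) (x : Int) (y : Int) : Bool :=
  pommeOuterA plateau x y 0

-- ===== PORT B =====
def pomme_sur_personnage_alt (plateau : List (List Bool)) (x : Int) (y : Int) : Bool :=
  if h : 0 ≤ x ∧ x < plateau.length then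
    let row := plateau.getD x.toNat []
    if 0 ≤ y ∧ y < row.length then row.getD y.toNat false else false
  else false

-- ===== PRECONDITION & SPEC =====
def Spec_pomme_sur_personnage (plateau : List (List Bool)) (x : Int) (y : Int) (out : Bool) : Prop := out = pomme_sur_personnage_alt plateau x y
instance (plateau : List (List Bool)) (x : Int) (y : Int) (out : Bool) : Decidable (Spec_pomme_sur_personnage plateau x y out) := by unfold Spec_pomme_sur_personnage; infer_instance

-- ===== CLAIM (what is proved, stated in full; the proofs are below) =====
def Claim_equal_pomme_sur_personnage : Prop := ∀ (plateau : List (List Bool)) (x : Int) (y : Int), Dom_pomme_sur_personnage plateau x y → Spec_pomme_sur_personnage plateau x y (pomme_sur_personnage plateau x y)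

-- ===== LEMMAS AND PROOFS =====

-- A's inner loop finds y in the row iff x equals the current row index and cell y-j of the row is True
lemma pommeInnerA_eq (ligne : List Bool) (x y i j : Int) :
    pommeInnerA ligne x y i j =
      (decide (x = i) && decide (0 ≤ y - j) && decide (y - j < ligne.length) &&
        ligne.getD (y - j).toNat false) := by
  induction ligne generalizing j with
  | nil => simp [pommeInnerA]
  | cons c rest ih =>
    simp only [pommeInnerA, ih]
    by_cases hx : x = i
    · by_cases hy : y = j
      · subst hy
        cases c <;> simp [hx] <;> try omega
      · have hcond : ¬ (c == true && x == i && y == j) = true := by simp; intro _ _; omega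
        simp only [hcond, if_neg, Bool.false_eq_true, if_false]
        by_cases h0 : 0 ≤ y - j
        · have hshift : (y - j).toNat = (y - (j + 1)).toNat + 1 := by omega
          have e1 : decide (0 ≤ y - (j + 1) : Prop) = decide (j < y : Prop) := by
            rw [decide_eq_decide]; omega
          have e2 : decide (0 ≤ y - j : Prop) = decide (j < y : Prop) := by
            rw [decide_eq_decide]; omega
          have e3 : decide (y - (j + 1) < (rest.length : Int) : Prop)
              = decide (y - j < (rest.length : Int) + 1 : Prop) := by
            rw [decide_eq_decide]; omega
          simp [hx, hshift, e3, show j < y by omega, show j ≤ y by omega]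
        · simp [show ¬ (j < y) by omega, show ¬ (j ≤ y) by omega]
    · have hcond : ¬ (c == true && x == i && y == j) = true := by
        simp; intro _ h; exact absurd h hx
      simp [hcond, hx]

lemma pommeOuterA_eq (plateau : List (List Bool)) (x y i : Int) :
    pommeOuterA plateau x y i =
      (if 0 ≤ x - i ∧ x - i < plateau.length then
        (let row := plateau.getD (x - i).toNat []
         if 0 ≤ y ∧ y < row.length then row.getD y.toNat false else false)
       else false) := by
  induction plateau generalizing i with
  | nil => simp [pommeOuterA]
  | cons l rest ih =>
    simp only [pommeOuterA, pommeInnerA_eq, ih]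
    by_cases hx : x = i
    · subst hx
      simp only [show x - x = 0 by omega, show ((0:Int)).toNat = 0 from rfl,
        List.getD_cons_zero, List.length_cons, sub_zero]
      by_cases hy : 0 ≤ y ∧ y < (l.length : Int)
      · by_cases hc : l.getD y.toNat false = true
        · simp [hy.1, hy.2, hc, show 0 ≤ (0:Int) by omega,
            show (0:Int) < (rest.length : Int) + 1 by omega]
        · simp [hy.1, hy.2, hc, show ¬ (0 ≤ x - (x + 1)) by omega,
            show 0 ≤ (0:Int) by omega, show (0:Int) < (rest.length : Int) + 1 by omega]
      · rcases not_and_or.mp hy with h | h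
        · simp [h]
        · simp [h]
    · have h1 : ¬ (decide (x = i) && decide (0 ≤ y - 0) && decide (y - 0 < (l.length : Int))
          && l.getD (y - 0).toNat false) = true := by
        simp; intro h; exact absurd h hx
      simp only [h1, Bool.false_eq_true, if_false]
      by_cases h0 : 0 ≤ x - i
      · have hshift : (x - i).toNat = (x - (i + 1)).toNat + 1 := by omega
        simp only [List.length_cons, hshift, List.getD_cons_succ]
        have e1 : decide (0 ≤ x - (i + 1) : Prop) = decide (i < x : Prop) := by
          rw [decide_eq_decide]; omega
        have e2 : decide (0 ≤ x - i : Prop) = decide (i < x : Prop) := by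
          rw [decide_eq_decide]; omega
        have e3 : decide (x - (i + 1) < (rest.length : Int) : Prop)
            = decide (x - i < (rest.length : Int) + 1 : Prop) := by
          rw [decide_eq_decide]; omega
        simp [e3, show i < x by omega, show i ≤ x by omega]
      · simp [show ¬ (i < x) by omega, show ¬ (i ≤ x) by omega]

-- ===== VERDICT (by name: the statement is the Claim_ definition above) =====
theorem pomme_sur_personnage_spec : Claim_equal_pomme_sur_personnage := by
  intro plateau x y _
  unfold Spec_pomme_sur_personnage pomme_sur_personnage pomme_sur_personnage_alt
  rw [pommeOuterA_eq]
  simp
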